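-- pv_equiv track=rewrite | github.com/uqfoundation/mystic | mystic/math/measures.py | _nested_split
-- ===== SOURCE A (Python) =====
-- def _nested_split(params, npts):
--   """
-- splits a flat parameter list into a list of weights and a list of positions;
-- weights and positions are expected to have the same dimensions (given by npts)
--
-- Inputs:
--     params -- a flat list of weights and positions (formatted as noted below)
--     npts -- a tuple describing the shape of the target lists
--
-- For example:
--     >>> nx = 3;  ny = 2;  nz = 1
--     >>> par = ['wx']*nx + ['x']*nx + ['wy']*ny + ['y']*ny + ['wz']*nz + ['z']*nz
--     >>> weights, positions = _nested_split(par, (nx,ny,nz))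
--     >>> weights
--     [['wx','wx','wx'], ['wy','wy'], ['wz']]
--     >>> positions
--     [['x','x','x'], ['y','y'], ['z']]
-- """
--   weights = []
--   coords = []
--   ind = 0
--   for i in range(len(npts)):
--     weights.append(params[ind:ind+npts[i]])
--     ind += npts[i]
--     coords.append(params[ind:ind+npts[i]])
--     ind += npts[i]
--   return weights, coords
-- ===== SOURCE B (Python) =====
-- def _nested_split(params, npts):
--     starts = []
--     s = 0
--     for n in npts:
--         starts.append(s)
--         s += 2 * n
--     weights = [params[s:s + n] for s, n in zip(starts, npts)]
--     coords = [params[s + n:s + 2 * n] for s, n in zip(starts, npts)]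
--     return weights, coords
-- ===== Notes on version B (the rewrite author's own statement) =====
-- stated objective: alternative
-- what changed: Replaced the single interleaved loop with a mutable running index by a precomputed prefix-sum offset table built in one pass, then two independent comprehensions over zip(starts, npts) for weights and coords.
import Mathlib
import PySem

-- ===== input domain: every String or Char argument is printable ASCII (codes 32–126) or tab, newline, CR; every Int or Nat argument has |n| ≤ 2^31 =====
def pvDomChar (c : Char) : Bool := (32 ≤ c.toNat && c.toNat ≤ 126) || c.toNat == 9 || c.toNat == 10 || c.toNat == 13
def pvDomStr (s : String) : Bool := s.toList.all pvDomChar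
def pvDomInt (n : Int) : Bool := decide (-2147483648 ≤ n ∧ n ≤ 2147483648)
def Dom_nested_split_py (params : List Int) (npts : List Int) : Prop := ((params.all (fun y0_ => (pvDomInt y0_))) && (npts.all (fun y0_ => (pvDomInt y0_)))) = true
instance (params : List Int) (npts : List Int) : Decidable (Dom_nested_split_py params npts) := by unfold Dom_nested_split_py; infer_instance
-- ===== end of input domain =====

-- B replaces A's single loop with a mutable running index by a precomputed
-- prefix-sum offset table and two independent comprehensions (alternative
-- decomposition, same return value).

-- ===== PORT A =====
-- literal port of A: one loop over range(len(npts)), state (weights, coords, ind)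
def nested_split_py (params : List Int) (npts : List Int) : List (List Int) × List (List Int) :=
  let st := (PySem.List.pyRange 0 (PySem.List.len npts) 1).foldl
    (fun (acc : List (List Int) × List (List Int) × Int) i =>
      let n := PySem.List.pyGetD npts i 0
      let weights := acc.1 ++ [PySem.List.slice params (some acc.2.2) (some (acc.2.2 + n))]
      let ind := acc.2.2 + n
      let coords := acc.2.1 ++ [PySem.List.slice params (some ind) (some (ind + n))]
      (weights, coords, ind + n)) ([], [], 0)
  (st.1, st.2.1)

-- ===== PORT B =====
-- literal port of B: offset table 'starts' built in one pass, then two comprehensions over zip(starts, npts)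
def nested_split_py_alt (params : List Int) (npts : List Int) : List (List Int) × List (List Int) :=
  let starts := (npts.foldl (fun (acc : List Int × Int) n => (acc.1 ++ [acc.2], acc.2 + 2 * n)) ([], 0)).1
  let weights := (starts.zip npts).map
    (fun p => PySem.List.slice params (some p.1) (some (p.1 + p.2)))
  let coords := (starts.zip npts).map
    (fun p => PySem.List.slice params (some (p.1 + p.2)) (some (p.1 + 2 * p.2)))
  (weights, coords)

-- ===== PRECONDITION & SPEC =====
def Spec_nested_split_py (params : List Int) (npts : List Int) (out : List (List Int) × List (List Int)) : Prop := out = nested_split_py_alt params npts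
instance (params : List Int) (npts : List Int) (out : List (List Int) × List (List Int)) : Decidable (Spec_nested_split_py params npts out) := by unfold Spec_nested_split_py; infer_instance

-- ===== CLAIM (what is proved, stated in full; the proofs are below) =====
def Claim_equal_nested_split_py : Prop := ∀ (params : List Int) (npts : List Int), Dom_nested_split_py params npts → Spec_nested_split_py params npts (nested_split_py params npts)

-- ===== LEMMAS AND PROOFS =====

-- canonical form of both results: structural recursion over npts carrying the offset
def pvW (params : List Int) : Int → List Int → List (List Int)
  | _, [] => []
  | ind, n :: t => PySem.List.slice params (some ind) (some (ind + n)) :: pvW params (ind + 2 * n) t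

def pvC (params : List Int) : Int → List Int → List (List Int)
  | _, [] => []
  | ind, n :: t => PySem.List.slice params (some (ind + n)) (some (ind + 2 * n)) :: pvC params (ind + 2 * n) t

-- A's loop, after foldl_pyRange_zero_pyGetD, unfolds to (w ++ pvW, c ++ pvC, final ind)
theorem pvA_loop (params : List Int) (npts : List Int) :
    ∀ (w c : List (List Int)) (ind : Int),
      npts.foldl
        (fun (acc : List (List Int) × List (List Int) × Int) n =>
          (acc.1 ++ [PySem.List.slice params (some acc.2.2) (some (acc.2.2 + n))],
           acc.2.1 ++ [PySem.List.slice params (some (acc.2.2 + n)) (some (acc.2.2 + n + n))],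
           acc.2.2 + n + n)) (w, c, ind)
      = (w ++ pvW params ind npts, c ++ pvC params ind npts, ind + 2 * npts.sum) := by
  induction npts with
  | nil => intro w c ind; simp [pvW, pvC]
  | cons n t ih =>
    intro w c ind
    simp only [List.foldl_cons, ih, pvW, pvC, List.sum_cons]
    refine Prod.ext (by simp [show ind + n + n = ind + 2 * n by ring]) (Prod.ext (by simp [show ind + n + n = ind + 2 * n by ring]) (by simp; ring))

-- the one-pass offset table unfolds to a cons-recursive form
theorem pvB_starts (npts : List Int) :
    ∀ (pre : List Int) (s0 : Int),
      (npts.foldl (fun (acc : List Int × Int) n => (acc.1 ++ [acc.2], acc.2 + 2 * n)) (pre, s0)).1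
      = pre ++ (List.range npts.length).map (fun i => s0 + 2 * (npts.take i).sum) := by
  induction npts with
  | nil => intro pre s0; simp
  | cons n t ih =>
    intro pre s0
    simp only [List.foldl_cons, ih, List.length_cons, List.range_succ_eq_map, List.map_cons,
      List.map_map, List.append_assoc]
    refine congrArg _ ?_
    simp only [List.take_zero, List.sum_nil, mul_zero, add_zero, List.singleton_append,
      List.cons.injEq, true_and]
    exact List.map_congr_left (fun i _ => by simp [List.take_succ_cons]; ring)

-- B's zip-of-offsets comprehensions unfold to pvW / pvC
theorem pvB_weights (params : List Int) (npts : List Int) :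
    ∀ (c0 : Int),
      ((((List.range npts.length).map (fun i => c0 + 2 * (npts.take i).sum)).zip npts).map
        (fun p => PySem.List.slice params (some p.1) (some (p.1 + p.2))))
      = pvW params c0 npts := by
  induction npts with
  | nil => intro c0; simp [pvW]
  | cons n t ih =>
    intro c0
    simp only [List.length_cons, List.range_succ_eq_map, List.map_cons, List.map_map,
      List.zip_cons_cons, List.map_cons, pvW]
    congr 1
    · simp
    rw [← ih (c0 + 2 * n)]
    rw [List.map_congr_left (l := List.range t.length)
      (f := (fun i => c0 + 2 * (List.take i (n :: t)).sum) ∘ Nat.succ)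
      (g := fun i => c0 + 2 * n + 2 * (List.take i t).sum)
      (fun i _ => by simp [List.take_succ_cons]; ring)]

theorem pvB_coords (params : List Int) (npts : List Int) :
    ∀ (c0 : Int),
      ((((List.range npts.length).map (fun i => c0 + 2 * (npts.take i).sum)).zip npts).map
        (fun p => PySem.List.slice params (some (p.1 + p.2)) (some (p.1 + 2 * p.2))))
      = pvC params c0 npts := by
  induction npts with
  | nil => intro c0; simp [pvC]
  | cons n t ih =>
    intro c0
    simp only [List.length_cons, List.range_succ_eq_map, List.map_cons, List.map_map,
      List.zip_cons_cons, List.map_cons, pvC]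
    congr 1
    · simp
    rw [← ih (c0 + 2 * n)]
    rw [List.map_congr_left (l := List.range t.length)
      (f := (fun i => c0 + 2 * (List.take i (n :: t)).sum) ∘ Nat.succ)
      (g := fun i => c0 + 2 * n + 2 * (List.take i t).sum)
      (fun i _ => by simp [List.take_succ_cons]; ring)]

-- ===== VERDICT (by name: the statement is the Claim_ definition above) =====
theorem nested_split_py_spec : Claim_equal_nested_split_py := by
  intro params npts _
  unfold Spec_nested_split_py nested_split_py nested_split_py_alt
  rw [PySem.List.foldl_pyRange_zero_pyGetD npts 0
    (fun (acc : List (List Int) × List (List Int) × Int) n =>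
      (acc.1 ++ [PySem.List.slice params (some acc.2.2) (some (acc.2.2 + n))],
       acc.2.1 ++ [PySem.List.slice params (some (acc.2.2 + n)) (some (acc.2.2 + n + n))],
       acc.2.2 + n + n)) ([], [], 0)]
  rw [pvA_loop params npts [] [] 0]
  rw [pvB_starts npts [] 0]
  simp only [List.nil_append]
  exact Prod.ext (by simpa using (pvB_weights params npts 0).symm)
    (by simpa using (pvB_coords params npts 0).symm)
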